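-- pv_equiv track=rewrite | github.com/luccamachado/Library-of-Alexandria | Library of Alexandria - Backup.py | tracker_data_normalization
-- ===== SOURCE A (Python) =====
-- def tracker_data_normalization(tracker_data):
--     frames = {""}
--     for i in range(len(tracker_data) - 1):
--         frames.add(int(tracker_data[i].split(" | ")[0].strip("[]")))
--
--     if len(tracker_data) == len(frames):
--         return tracker_data
--     else:
--         for i in range(len(tracker_data) - 2):
--             if int(tracker_data[i].split(" | ")[0].strip("[]")) == int(tracker_data[i + 1].split(" | ")[0].strip("[]")):
--                 data = tracker_data[i + 1].split(" | ")
--                 f = int(data[0].strip("[]")) + 1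
--                 tracker_data[i + 1] = "[" + str(f) + " | " + data[1] + " | " + data[2] + "]"
--
--         return tracker_data
-- ===== SOURCE B (Python) =====
-- # Single forward pass appending to a fresh output list (no frames set, no pre-check);
-- # equivalence is about the return value: A mutates its argument in place, B builds a new list.
--
-- def tracker_data_normalization(tracker_data):
--     if len(tracker_data) < 2:
--         return tracker_data
--     out = [tracker_data[0]]
--     for line in tracker_data[1:-1]:
--         prev_id = int(out[-1].split(" | ")[0].strip("[]"))
--         cur_id = int(line.split(" | ")[0].strip("[]"))
--         if cur_id == prev_id:
--             parts = line.split(" | ")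
--             line = "[" + str(cur_id + 1) + " | " + parts[1] + " | " + parts[2] + "]"
--         out.append(line)
--     out.append(tracker_data[-1])
--     return out
-- ===== Notes on version B (the rewrite author's own statement) =====
-- stated objective: simpler
-- what changed: B drops A's frames-set building pass and the len(tracker_data)==len(frames) check (the normalization loop is a no-op exactly when that check passes) and replaces A's in-place index loop by a single forward pass over tracker_data[1:-1] that appends to a fresh output list, comparing each line's id with the id of the last emitted line.
import Mathlib
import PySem

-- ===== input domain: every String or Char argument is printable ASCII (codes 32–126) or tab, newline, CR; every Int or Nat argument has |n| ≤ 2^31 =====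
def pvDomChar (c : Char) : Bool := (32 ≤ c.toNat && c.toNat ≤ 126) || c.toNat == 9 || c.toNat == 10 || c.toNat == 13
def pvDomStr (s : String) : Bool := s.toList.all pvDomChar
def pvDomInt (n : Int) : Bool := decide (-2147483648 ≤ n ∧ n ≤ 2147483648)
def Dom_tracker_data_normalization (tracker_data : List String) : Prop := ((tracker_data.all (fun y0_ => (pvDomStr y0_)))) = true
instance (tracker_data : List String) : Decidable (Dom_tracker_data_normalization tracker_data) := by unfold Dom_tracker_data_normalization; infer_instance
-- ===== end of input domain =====

-- B replaces A's frames-set pass + length check + in-place index loop by one forward pass that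
-- appends to a fresh output list (objective: simpler). A mutates its argument in place, B builds a
-- new list; the equivalence proved here is about the return value.

-- shared helpers: the Python expressions both programs use verbatim
-- s.split(" | ")  (the separator is nonempty, so Python's split never raises: split? is always `some`)
def pvParts (s : String) : List String := (PySem.Str.split? s " | ").getD []
-- int(s.split(" | ")[0].strip("[]")); `.getD 0` is the ValueError case, excluded by Pre_
def pvParse (s : String) : Int :=
  (PySem.Int.ofStr? (PySem.Str.stripChars (PySem.List.pyGetD (pvParts s) 0 "") "[]")).getD 0
-- "[" + str(f) + " | " + p1 + " | " + p2 + "]", built on List Char (Lean's String.append is kernel-opaque)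
def pvRebuild (f : Int) (p1 p2 : String) : String :=
  String.ofList ('[' :: PySem.Int.toChars f ++ " | ".toList ++ p1.toList ++ " | ".toList ++ p2.toList ++ [']'])

-- ===== PORT A =====
def tracker_data_normalization (tracker_data : List String) : List String :=
  -- frames = {""} ∪ {ids of lines 0..n-2}: the string "" is modelled as `none`, each int id as `some id`
  let frames : PySem.Set (Option Int) :=
    (PySem.List.pyRange 0 ((tracker_data.length : Int) - 1)).foldl
      (fun fs i => fs.add (some (pvParse (PySem.List.pyGetD tracker_data i "")))) (PySem.Set.ofList [none])
  if (tracker_data.length : Int) = PySem.Set.len frames then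
    tracker_data
  else
    (PySem.List.pyRange 0 ((tracker_data.length : Int) - 2)).foldl
      (fun td i =>
        if pvParse (PySem.List.pyGetD td i "") = pvParse (PySem.List.pyGetD td (i + 1) "") then
          let data := pvParts (PySem.List.pyGetD td (i + 1) "")
          let f := pvParse (PySem.List.pyGetD td (i + 1) "") + 1  -- int(data[0].strip("[]")) + 1: pvParse names that same expression
          PySem.List.pySetD td (i + 1) (pvRebuild f (PySem.List.pyGetD data 1 "") (PySem.List.pyGetD data 2 ""))
        else td)
      tracker_data

-- ===== PORT B =====
def tracker_data_normalization_alt (tracker_data : List String) : List String :=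
  if tracker_data.length < 2 then tracker_data
  else
    ((PySem.List.slice tracker_data (some 1) (some (-1))).foldl
      (fun out line =>
        let prevId := pvParse (PySem.List.pyGetD out (-1) "")
        let curId := pvParse line
        out ++ [if curId = prevId then
                  let parts := pvParts line
                  pvRebuild (curId + 1) (PySem.List.pyGetD parts 1 "") (PySem.List.pyGetD parts 2 "")
                else line])
      [PySem.List.pyGetD tracker_data 0 ""]) ++ [PySem.List.pyGetD tracker_data (-1) ""]

-- ===== PRECONDITION & SPEC =====
-- pvCrash prev lines = true iff, walking the lines after the first with the running id `prev`
-- (a rebuilt line's id becomes old id + 1), some line that gets rebuilt has fewer than three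
-- " | "-parts — i.e. exactly Python's IndexError on data[1]/data[2].
def pvCrash : Int → List String → Bool
  | _, [] => false
  | prev, s :: rest =>
      let a := pvParse s
      if prev = a then decide ((pvParts s).length < 3) || pvCrash (a + 1) rest
      else pvCrash a rest

def pvCrashL : List String → Bool
  | [] => false
  | x :: rest => pvCrash (pvParse x) rest

-- Pre_ excludes exactly the inputs on which the Python A raises and nothing else: a line before the
-- last whose id is not int-parsable (ValueError), or a line the normalization pass rebuilds that has
-- fewer than three " | "-parts (IndexError on data[1]/data[2], characterised by pvCrashL); on every
-- input A returns on, Pre_ holds and B returns the same value.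
def Pre_tracker_data_normalization (tracker_data : List String) : Prop :=
  (∀ s ∈ tracker_data.dropLast,
      (PySem.Int.ofStr? (PySem.Str.stripChars (PySem.List.pyGetD (pvParts s) 0 "") "[]")).isSome = true)
  ∧ pvCrashL tracker_data.dropLast = false
instance (tracker_data : List String) : Decidable (Pre_tracker_data_normalization tracker_data) := by
  unfold Pre_tracker_data_normalization; infer_instance

def pvWitness_tracker_data_normalization : List String := ["[1 | a | b]", "[1 | c | d]", "x"]

def Spec_tracker_data_normalization (tracker_data : List String) (out : List String) : Prop :=
  out = tracker_data_normalization_alt tracker_data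
instance (tracker_data : List String) (out : List String) : Decidable (Spec_tracker_data_normalization tracker_data out) := by
  unfold Spec_tracker_data_normalization; infer_instance

-- ===== CLAIM (what is proved, stated in full; the proofs are below) =====
def Claim_equal_tracker_data_normalization : Prop := ∀ (tracker_data : List String), Dom_tracker_data_normalization tracker_data → Pre_tracker_data_normalization tracker_data → Spec_tracker_data_normalization tracker_data (tracker_data_normalization tracker_data)

-- ===== LEMMAS AND PROOFS =====

-- the two loop bodies, named so the lemmas can speak about them (definitionally the ports' lambdas)
def pvStepA (td : List String) (i : Int) : List String :=
  if pvParse (PySem.List.pyGetD td i "") = pvParse (PySem.List.pyGetD td (i + 1) "") then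
    let data := pvParts (PySem.List.pyGetD td (i + 1) "")
    let f := pvParse (PySem.List.pyGetD td (i + 1) "") + 1
    PySem.List.pySetD td (i + 1) (pvRebuild f (PySem.List.pyGetD data 1 "") (PySem.List.pyGetD data 2 ""))
  else td

def pvStepB (out : List String) (line : String) : List String :=
  let prevId := pvParse (PySem.List.pyGetD out (-1) "")
  let curId := pvParse line
  out ++ [if curId = prevId then
            let parts := pvParts line
            pvRebuild (curId + 1) (PySem.List.pyGetD parts 1 "") (PySem.List.pyGetD parts 2 "")
          else line]

lemma pv_pyGetD_neg_one {α : Type} (xs : List α) (d : α) (h : xs ≠ []) :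
    PySem.List.pyGetD xs (-1) d = xs.getLast h := by
  have hlen : 0 < xs.length := List.length_pos_iff.mpr h
  simp only [PySem.List.pyGetD, PySem.List.pyGet?, PySem.List.pyIdx?]
  rw [if_neg (by omega), if_pos (by omega)]
  have e : (-(-1 : Int)).toNat = 1 := by omega
  rw [e, List.getLast_eq_getElem, Option.bind_some]
  simp [List.getElem?_eq_getElem (show xs.length - 1 < xs.length by omega)]

lemma pv_pyGetD_append_last {α : Type} (out t : List α) (d : α) (h : out ≠ []) :
    PySem.List.pyGetD (out ++ t) ((out.length : Int) - 1) d = out.getLast h := by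
  have hlen : 0 < out.length := List.length_pos_iff.mpr h
  have h0 : (0 : Int) ≤ (out.length : Int) - 1 := by omega
  have h1 : (out.length : Int) - 1 < ((out ++ t).length : Int) := by simp
  simp only [PySem.List.pyGetD, PySem.List.pyGet?, PySem.List.pyIdx?, if_pos h0,
             if_pos h1, Option.bind_some]
  have : ((out.length : Int) - 1).toNat = out.length - 1 := by omega
  rw [this, List.getElem?_append_left (by omega), List.getLast_eq_getElem,
      List.getElem?_eq_getElem (show out.length - 1 < out.length by omega)]
  rfl

lemma pv_pyGetD_append_len {α : Type} (out : List α) (x : α) (t : List α) (d : α) :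
    PySem.List.pyGetD (out ++ x :: t) (out.length : Int) d = x := by
  have h1 : ((out.length : Int)) < ((out ++ x :: t).length : Int) := by simp
  simp only [PySem.List.pyGetD, PySem.List.pyGet?, PySem.List.pyIdx?,
             if_pos (by omega : (0:Int) ≤ (out.length : Int)), if_pos h1, Option.bind_some]
  have e : ((out.length : Int)).toNat = out.length := by omega
  rw [e, List.getElem?_append_right (le_refl _)]
  simp

lemma pv_pySetD_append {α : Type} (out : List α) (x : α) (t : List α) (v : α) :
    PySem.List.pySetD (out ++ x :: t) (out.length : Int) v = out ++ v :: t := by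
  rw [PySem.List.pySetD_natCast, List.set_append]
  simp

lemma pv_pyGetD_prefix {α : Type} (t u : List α) (i : Int) (d : α)
    (h0 : 0 ≤ i) (h : i < (t.length : Int)) :
    PySem.List.pyGetD (t ++ u) i d = PySem.List.pyGetD t i d := by
  have h1 : i < ((t ++ u).length : Int) := by simp; omega
  simp only [PySem.List.pyGetD, PySem.List.pyGet?, PySem.List.pyIdx?, if_pos h0, if_pos h, if_pos h1,
             Option.bind_some]
  rw [List.getElem?_append_left (by omega)]

lemma pv_slice_mid (x : String) (rest : List String) :
    PySem.List.slice (x :: rest) (some 1) (some (-1)) = rest.dropLast := by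
  simp [PySem.List.slice, List.dropLast_eq_take]

-- A's normalization loop, started on out ++ (mid ++ [lastL]) at index |out| - 1, is B's pass over mid.
lemma pv_bridge : ∀ (mid out : List String) (lastL : String), out ≠ [] →
    (PySem.List.pyRange ((out.length : Int) - 1) ((out.length : Int) - 1 + mid.length)).foldl
        pvStepA (out ++ (mid ++ [lastL]))
      = (mid.foldl pvStepB out) ++ [lastL] := by
  intro mid
  induction mid with
  | nil =>
      intro out lastL h
      rw [PySem.List.pyRange_one_eq_nil (by simp)]
      simp
  | cons m mid ih =>
      intro out lastL h
      rw [PySem.List.pyRange_one_cons (by simp)]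
      have hget1 : PySem.List.pyGetD (out ++ (m :: mid ++ [lastL])) ((out.length : Int) - 1) ""
          = out.getLast h := pv_pyGetD_append_last out _ "" h
      have hget2 : PySem.List.pyGetD (out ++ (m :: mid ++ [lastL])) ((out.length : Int) - 1 + 1) ""
          = m := by
        have : (out.length : Int) - 1 + 1 = (out.length : Int) := by omega
        rw [this]; exact pv_pyGetD_append_len out m _ ""
      by_cases hc : pvParse (out.getLast h) = pvParse m
      · have hstep : pvStepA (out ++ (m :: mid ++ [lastL])) ((out.length : Int) - 1)
            = (out ++ [pvRebuild (pvParse m + 1) (PySem.List.pyGetD (pvParts m) 1 "")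
                (PySem.List.pyGetD (pvParts m) 2 "")]) ++ (mid ++ [lastL]) := by
          simp only [pvStepA, hget1, hget2, if_pos hc]
          have e1 : (out.length : Int) - 1 + 1 = (out.length : Int) := by omega
          have e2 : out ++ (m :: mid ++ [lastL]) = out ++ m :: (mid ++ [lastL]) := by simp
          rw [e1, e2, pv_pySetD_append]
          simp
        have hstepB : pvStepB out m
            = out ++ [pvRebuild (pvParse m + 1) (PySem.List.pyGetD (pvParts m) 1 "")
                (PySem.List.pyGetD (pvParts m) 2 "")] := by
          simp only [pvStepB, pv_pyGetD_neg_one out "" h]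
          rw [if_pos hc.symm]
        rw [List.foldl_cons, hstep, List.foldl_cons, hstepB]
        have harith : (out.length : Int) - 1 + 1
            = ((out ++ [pvRebuild (pvParse m + 1) (PySem.List.pyGetD (pvParts m) 1 "")
                (PySem.List.pyGetD (pvParts m) 2 "")]).length : Int) - 1 := by simp
        have harith2 : (out.length : Int) - 1 + ((m :: mid).length : Int)
            = ((out ++ [pvRebuild (pvParse m + 1) (PySem.List.pyGetD (pvParts m) 1 "")
                (PySem.List.pyGetD (pvParts m) 2 "")]).length : Int) - 1 + (mid.length : Int) := by
          simp
        rw [harith2, harith, ih _ lastL (by simp)]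
      · have hstep : pvStepA (out ++ (m :: mid ++ [lastL])) ((out.length : Int) - 1)
            = (out ++ [m]) ++ (mid ++ [lastL]) := by
          simp only [pvStepA, hget1, hget2, if_neg hc]
          simp
        have hstepB : pvStepB out m = out ++ [m] := by
          simp only [pvStepB, pv_pyGetD_neg_one out "" h]
          rw [if_neg (Ne.symm hc)]
        rw [List.foldl_cons, hstep, List.foldl_cons, hstepB]
        have harith : (out.length : Int) - 1 + 1 = ((out ++ [m]).length : Int) - 1 := by simp
        have harith2 : (out.length : Int) - 1 + ((m :: mid).length : Int)
            = ((out ++ [m]).length : Int) - 1 + (mid.length : Int) := by simp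
        rw [harith2, harith, ih _ lastL (by simp)]

-- with pairwise-distinct ids B's pass copies the list unchanged
lemma pv_noop : ∀ (mid out : List String) (h : out ≠ []),
    List.Pairwise (fun a b => pvParse a ≠ pvParse b) (out.getLast h :: mid) →
    mid.foldl pvStepB out = out ++ mid := by
  intro mid
  induction mid with
  | nil => intro out lastL h; simp
  | cons m mid ih =>
      intro out h hp
      have hne : pvParse (out.getLast h) ≠ pvParse m :=
        (List.pairwise_cons.mp hp).1 m (by simp)
      have hstepB : pvStepB out m = out ++ [m] := by
        simp only [pvStepB, pv_pyGetD_neg_one out "" h, if_neg (Ne.symm hne)]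
      rw [List.foldl_cons, hstepB, ih (out ++ [m]) (by simp)]
      · simp
      · have : (out ++ [m]).getLast (by simp) = m := by
          rw [List.getLast_append]; simp
        rw [this]
        exact (List.pairwise_cons.mp hp).2

lemma pv_ofList_map_some : ∀ (xs : List Int),
    PySem.Set.ofList (xs.map some) = (PySem.Set.ofList xs).map some := by
  intro xs
  induction xs using List.reverseRecOn with
  | nil => rfl
  | append_singleton xs x ih =>
      rw [List.map_append, List.map_singleton, PySem.Set.ofList_append_singleton,
          PySem.Set.ofList_append_singleton, ih, PySem.Set.add_eq_ite, PySem.Set.add_eq_ite]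
      by_cases hx : x ∈ PySem.Set.ofList xs
      · rw [if_pos (List.mem_map_of_mem hx), if_pos hx]
      · rw [if_neg (by simpa using hx), if_neg hx]; simp

-- A's frames set is {none} followed by the distinct ids of the lines before the last
lemma pv_frames (l : List String) :
    (PySem.List.pyRange 0 ((l.length : Int) - 1)).foldl
        (fun fs i => fs.add (some (pvParse (PySem.List.pyGetD l i "")))) (PySem.Set.ofList [none])
      = none :: (PySem.Set.ofList (l.dropLast.map pvParse)).map some := by
  rcases List.eq_nil_or_concat l with rfl | ⟨t, x, rfl⟩
  · rw [PySem.List.pyRange_one_eq_nil (by simp)]; rfl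
  · simp only [List.concat_eq_append]
    have hlen : ((t ++ [x]).length : Int) - 1 = (t.length : Int) := by simp
    rw [hlen]
    have hcongr : (PySem.List.pyRange 0 (t.length : Int)).foldl
        (fun fs i => fs.add (some (pvParse (PySem.List.pyGetD (t ++ [x]) i "")))) (PySem.Set.ofList [none])
        = (PySem.List.pyRange 0 (t.length : Int)).foldl
        (fun fs i => fs.add (some (pvParse (PySem.List.pyGetD t i "")))) (PySem.Set.ofList [none]) := by
      apply PySem.List.foldl_congr_mem
      intro acc i hi
      obtain ⟨h0, h1⟩ := (PySem.List.mem_pyRange_one).mp hi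
      rw [pv_pyGetD_prefix t [x] i "" h0 h1]
    rw [hcongr, PySem.List.foldl_pyRange_zero_pyGetD' t ""
          (fun (fs : PySem.Set (Option Int)) s => PySem.Set.add fs (some (pvParse s)))
          (PySem.Set.ofList [none])]
    rw [← PySem.Set.update_map_eq_foldl_add t (fun s => some (pvParse s)) (PySem.Set.ofList [none])]
    rw [PySem.Set.update_eq_append_filter]
    have : t.map (fun s => some (pvParse s)) = (t.map pvParse).map some := by simp
    rw [this, pv_ofList_map_some, List.filter_eq_self.mpr ?_]
    · show PySem.Set.ofList [none] ++ _ = _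
      rw [show PySem.Set.ofList [none] = [none] from rfl]
      simp
    · intro a ha
      obtain ⟨b, _, rfl⟩ := List.mem_map.mp ha
      simp [PySem.Set.contains]

lemma pv_len_check {l : List String} (hl : l ≠ [])
    (h : (l.length : Int) = PySem.Set.len (none :: (PySem.Set.ofList (l.dropLast.map pvParse)).map some)) :
    (l.dropLast.map pvParse).Nodup := by
  set ids := l.dropLast.map pvParse with hids
  have hlen : l.length = l.dropLast.length + 1 := by
    rw [List.length_dropLast]
    have := List.length_pos_iff.mpr hl
    omega
  have hcard : (PySem.Set.ofList ids).length = ids.length := by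
    simp only [PySem.Set.len, List.length_cons, List.length_map] at h
    have : ids.length = l.dropLast.length := by simp [hids]
    omega
  have hperm : (PySem.Set.ofList ids).Perm ids.dedup := by
    rw [List.perm_ext_iff_of_nodup (PySem.Set.nodup_ofList ids) ids.nodup_dedup]
    intro a
    rw [PySem.Set.mem_ofList, List.mem_dedup]
  have hdl : ids.dedup.length = ids.length := by rw [← hperm.length_eq, hcard]
  have : ids.dedup = ids := (List.dedup_sublist ids).eq_of_length hdl
  rw [← this]
  exact ids.nodup_dedup

-- ===== VERDICT (by name: the statement is the Claim_ definition above) =====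
theorem tracker_data_normalization_spec : Claim_equal_tracker_data_normalization := by
  intro l _ _
  unfold Spec_tracker_data_normalization
  show tracker_data_normalization l = tracker_data_normalization_alt l
  match l with
  | [] => decide
  | [x] =>
      simp [tracker_data_normalization, tracker_data_normalization_alt, PySem.Set.len]
  | x :: y :: t =>
      set rest := y :: t with hrest
      have hrne : rest ≠ [] := by simp [hrest]
      set mid := rest.dropLast with hmid
      set lastL := rest.getLast hrne with hlast
      have hsplit : mid ++ [lastL] = rest := List.dropLast_append_getLast hrne
      have hlge : (x :: rest).length = mid.length + 2 := by
        have : rest.length = mid.length + 1 := by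
          rw [hmid, List.length_dropLast]
          have := List.length_pos_iff.mpr hrne
          omega
        simp [this]
      -- B's value
      have hB : tracker_data_normalization_alt (x :: rest)
          = (mid.foldl pvStepB [x]) ++ [lastL] := by
        unfold tracker_data_normalization_alt
        rw [if_neg (by simp)]
        rw [pv_slice_mid x rest]
        have hget0 : PySem.List.pyGetD (x :: rest) 0 "" = x := by
          simp [PySem.List.pyGetD, PySem.List.pyGet?, PySem.List.pyIdx?]
        have hgetm1 : PySem.List.pyGetD (x :: rest) (-1) "" = lastL := by
          rw [pv_pyGetD_neg_one (x :: rest) "" (by simp)]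
          rw [hlast, List.getLast_cons hrne]
        rw [hget0, hgetm1, ← hmid]
        rfl
      unfold tracker_data_normalization
      rw [pv_frames (x :: rest)]
      by_cases hchk : (((x :: rest).length : Int))
          = PySem.Set.len (none :: (PySem.Set.ofList ((x :: rest).dropLast.map pvParse)).map some)
      · rw [if_pos hchk]
        have hnd := pv_len_check (by simp) hchk
        have hdl : (x :: rest).dropLast = x :: mid := by
          rw [hmid, List.dropLast_cons_of_ne_nil hrne]
        rw [hdl] at hnd
        have hpw : List.Pairwise (fun a b => pvParse a ≠ pvParse b) (x :: mid) :=
          List.pairwise_map.mp hnd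
        have := pv_noop mid [x] (by simp) (by simpa using hpw)
        rw [hB, this]
        simp [hsplit]
      · rw [if_neg hchk]
        have hrange : (PySem.List.pyRange 0 (((x :: rest).length : Int) - 2))
            = PySem.List.pyRange ((([x] : List String).length : Int) - 1)
                ((([x] : List String).length : Int) - 1 + (mid.length : Int)) := by
          have h2 : rest.length = mid.length + 1 := by
            rw [hmid, List.length_dropLast]
            have := List.length_pos_iff.mpr hrne
            omega
          congr 1
          all_goals simp only [List.length_cons, List.length_nil]
          all_goals omega
        have hstate : x :: rest = [x] ++ (mid ++ [lastL]) := by rw [hsplit]; rfl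
        rw [hrange]
        show List.foldl pvStepA (x :: rest)
            (PySem.List.pyRange ((([x] : List String).length : Int) - 1)
              ((([x] : List String).length : Int) - 1 + (mid.length : Int)))
          = tracker_data_normalization_alt (x :: rest)
        conv_lhs => rw [hstate]
        rw [pv_bridge mid [x] lastL (by simp), hB]
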